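-- pv_equiv track=rewrite | github.com/iQuHACK/2021_QUBO | nsp2gc.py | nsp_to_graph_coloring
-- ===== SOURCE A (Python) =====
-- def nsp_to_graph_coloring(nurses, days, shifts, nurses_per_shift):
--     adj = {}
--
--     # add all nodes
--     for layer in range(nurses_per_shift):
--         for d in range(days):
--             for s in range(shifts):
--                 adj[f"l{layer}_d{d}_s{s}"] = set()
--
--     # add intra-layer edges
--     for layer in range(nurses_per_shift):
--         for d in range(days):
--             for s in range(shifts):
--                 for s_ in range(s+1, shifts):
--                     adj[f"l{layer}_d{d}_s{s}"].add(f"l{layer}_d{d}_s{s_}")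
--                 if s == shifts - 1 and d < days - 1:
--                     adj[f"l{layer}_d{d}_s{s}"].add(f"l{layer}_d{d+1}_s0")
--
--     #add inter-layer edges
--     for l1 in range(nurses_per_shift):
--         for l2 in range(l1 + 1, nurses_per_shift):
--             for d in range(days):
--                 for s in range(shifts):
--                     adj[f"l{l1}_d{d}_s{s}"].add(f"l{l2}_d{d}_s{s}")
--
--                     for s_ in range(shifts):
--                         adj[f"l{l1}_d{d}_s{s}"].add(f"l{l2}_d{d}_s{s_}")
--                     if s == shifts - 1 and d < days - 1:
--                         adj[f"l{l1}_d{d}_s{s}"].add(f"l{l2}_d{d+1}_s0")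
--                         adj[f"l{l2}_d{d}_s{s}"].add(f"l{l1}_d{d+1}_s0")
--     return adj
-- ===== SOURCE B (Python) =====
-- def nsp_to_graph_coloring(nurses, days, shifts, nurses_per_shift):
--     # Linearize the (layer, day, shift) grid into consecutive integer ids
--     # (id = layer*days*shifts + day*shifts + shift) and do all graph work in
--     # id arithmetic: neighbour sets are plain arithmetic ranges (contiguous or
--     # strided by days*shifts); node names are rendered from ids at the edges.
--     D, S, P = max(days, 0), max(shifts, 0), max(nurses_per_shift, 0)
--     DS = D * S
--     N = P * DS
--
--     def name(i):
--         l, r = divmod(i, DS)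
--         d, s = divmod(r, S)
--         return f"l{l}_d{d}_s{s}"
--
--     adj = {}
--     for i in range(N):
--         l, r = divmod(i, DS)
--         d, s = divmod(r, S)
--         rollover = s == S - 1 and d < D - 1
--         ids = list(range(i + 1, i + S - s))          # later shifts, same layer/day
--         if rollover:
--             ids.append(i + 1)                        # own next-day shift 0 (= i+1)
--             ids.extend(range((d + 1) * S, l * DS, DS))   # next-day shift 0 of lower layers
--         for j in range(i + DS, N, DS):               # same (day, shift) in higher layers
--             row = j - s                              # that layer's shift 0 of this day
--             ids.append(j)
--             ids.extend(t for t in range(row, row + S) if t != j)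
--             if rollover:
--                 ids.append(row + S)                  # that layer's next-day shift 0
--         adj[name(i)] = {name(t) for t in ids}
--     return adj
-- ===== Notes on version B (the rewrite author's own statement) =====
-- stated objective: alternative
-- what changed: B linearizes the (layer,day,shift) grid into consecutive integer node ids and computes each neighbour set purely by id arithmetic (contiguous and stride-days*shifts integer ranges, divmod decoding), rendering string names only at the edges, instead of A's three scatter passes over nested layer/day/shift loops that mutate string-keyed sets.
import Mathlib
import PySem

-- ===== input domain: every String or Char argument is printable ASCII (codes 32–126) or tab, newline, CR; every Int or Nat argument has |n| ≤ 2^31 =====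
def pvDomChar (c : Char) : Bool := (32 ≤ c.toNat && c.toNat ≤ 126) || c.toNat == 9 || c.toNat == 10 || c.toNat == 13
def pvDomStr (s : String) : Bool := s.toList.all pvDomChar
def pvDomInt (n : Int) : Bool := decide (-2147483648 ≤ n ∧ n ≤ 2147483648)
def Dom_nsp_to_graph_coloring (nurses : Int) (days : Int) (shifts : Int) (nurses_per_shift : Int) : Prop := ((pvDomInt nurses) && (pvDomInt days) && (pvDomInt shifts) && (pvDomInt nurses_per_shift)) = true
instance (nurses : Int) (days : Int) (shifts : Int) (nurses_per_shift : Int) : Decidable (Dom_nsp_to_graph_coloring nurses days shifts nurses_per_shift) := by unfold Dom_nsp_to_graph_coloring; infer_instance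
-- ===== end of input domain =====

-- B linearizes the (layer,day,shift) grid into consecutive integer node ids and computes every
-- neighbour set by id arithmetic (contiguous and strided ranges, divmod decoding), rendering
-- string names only at the edges, instead of A's three scatter passes over string-keyed sets.


-- ===== PORT A =====
-- f"l{x}_d{y}_s{z}" (both Pythons build node names with exactly this f-string)
def pvNode (x y z : Int) : String :=
  String.ofList ('l' :: PySem.Int.toChars x ++ '_' :: 'd' :: PySem.Int.toChars y ++ '_' :: 's' :: PySem.Int.toChars z)

-- adj[k].add(v) is ported as Dict.modify k Set.empty (Set.add . v); the key is always present
-- (inserted by the first pass), so the default is never used and Python's KeyError cannot occur.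
def nsp_to_graph_coloring (nurses : Int) (days : Int) (shifts : Int) (nurses_per_shift : Int) : List (String × List String) :=
  let adj : PySem.Dict String (PySem.Set String) :=
    (PySem.List.pyRange 0 nurses_per_shift 1).foldl (fun acc layer =>
      (PySem.List.pyRange 0 days 1).foldl (fun acc d =>
        (PySem.List.pyRange 0 shifts 1).foldl (fun acc s =>
          acc.insert (pvNode layer d s) PySem.Set.empty) acc) acc) PySem.Dict.empty
  let adj :=
    (PySem.List.pyRange 0 nurses_per_shift 1).foldl (fun acc layer =>
      (PySem.List.pyRange 0 days 1).foldl (fun acc d =>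
        (PySem.List.pyRange 0 shifts 1).foldl (fun acc s =>
          let acc := (PySem.List.pyRange (s+1) shifts 1).foldl (fun acc s_ =>
            acc.modify (pvNode layer d s) PySem.Set.empty (fun st => PySem.Set.add st (pvNode layer d s_))) acc
          if s = shifts - 1 ∧ d < days - 1 then
            acc.modify (pvNode layer d s) PySem.Set.empty (fun st => PySem.Set.add st (pvNode layer (d+1) 0))
          else acc) acc) acc) adj
  let adj :=
    (PySem.List.pyRange 0 nurses_per_shift 1).foldl (fun acc l1 =>
      (PySem.List.pyRange (l1+1) nurses_per_shift 1).foldl (fun acc l2 =>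
        (PySem.List.pyRange 0 days 1).foldl (fun acc d =>
          (PySem.List.pyRange 0 shifts 1).foldl (fun acc s =>
            let acc := acc.modify (pvNode l1 d s) PySem.Set.empty (fun st => PySem.Set.add st (pvNode l2 d s))
            let acc := (PySem.List.pyRange 0 shifts 1).foldl (fun acc s_ =>
              acc.modify (pvNode l1 d s) PySem.Set.empty (fun st => PySem.Set.add st (pvNode l2 d s_))) acc
            if s = shifts - 1 ∧ d < days - 1 then
              (acc.modify (pvNode l1 d s) PySem.Set.empty (fun st => PySem.Set.add st (pvNode l2 (d+1) 0))).modify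
                (pvNode l2 d s) PySem.Set.empty (fun st => PySem.Set.add st (pvNode l1 (d+1) 0))
            else acc) acc) acc) acc) adj
  adj.items

-- ===== PORT B =====
-- name(i): decode a linear id (divmod by days*shifts, then by shifts) and render the node name
def pvName (DS S i : Int) : String :=
  pvNode (PySem.Int.floordiv i DS)
    (PySem.Int.floordiv (PySem.Int.mod i DS) S) (PySem.Int.mod (PySem.Int.mod i DS) S)

-- ids: the neighbour ids of node id i (decoded as layer l, day d, shift s), pure id arithmetic
def pvIds (D S DS N i l d s : Int) : List Int :=
  let ids := PySem.List.pyRange (i+1) (i + S - s) 1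
  let ids := if s = S - 1 ∧ d < D - 1 then ids ++ (i+1) :: PySem.List.pyRange ((d+1)*S) (l*DS) DS else ids
  (PySem.List.pyRange (i+DS) N DS).foldl (fun ids j =>
    let ids := ids ++ j :: (PySem.List.pyRange (j-s) (j-s+S) 1).filter (fun t => t != j)
    if s = S - 1 ∧ d < D - 1 then ids ++ [j - s + S] else ids) ids

def nsp_to_graph_coloring_alt (nurses : Int) (days : Int) (shifts : Int) (nurses_per_shift : Int) : List (String × List String) :=
  let D := max days 0
  let S := max shifts 0
  let P := max nurses_per_shift 0
  let DS := D * S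
  let N := P * DS
  ((PySem.List.pyRange 0 N 1).foldl (fun acc i =>
    acc.insert (pvName DS S i)
      (PySem.Set.ofList ((pvIds D S DS N i
          (PySem.Int.floordiv i DS)
          (PySem.Int.floordiv (PySem.Int.mod i DS) S)
          (PySem.Int.mod (PySem.Int.mod i DS) S)).map (pvName DS S)))) PySem.Dict.empty).items

-- ===== PRECONDITION & SPEC =====
def Spec_nsp_to_graph_coloring (nurses : Int) (days : Int) (shifts : Int) (nurses_per_shift : Int) (out : List (String × List String)) : Prop := out = nsp_to_graph_coloring_alt nurses days shifts nurses_per_shift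
instance (nurses : Int) (days : Int) (shifts : Int) (nurses_per_shift : Int) (out : List (String × List String)) : Decidable (Spec_nsp_to_graph_coloring nurses days shifts nurses_per_shift out) := by unfold Spec_nsp_to_graph_coloring; infer_instance

-- ===== CLAIM (what is proved, stated in full; the proofs are below) =====
def Claim_equal_nsp_to_graph_coloring : Prop := ∀ (nurses : Int) (days : Int) (shifts : Int) (nurses_per_shift : Int), Dom_nsp_to_graph_coloring nurses days shifts nurses_per_shift → Spec_nsp_to_graph_coloring nurses days shifts nurses_per_shift (nsp_to_graph_coloring nurses days shifts nurses_per_shift)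

-- ===== LEMMAS AND PROOFS =====
lemma pv_foldl_if_singleton {α β : Type} (f : β → α → β) (a : β) (c : Prop) [Decidable c] (x : α) :
    List.foldl f a (if c then [x] else []) = if c then f a x else a := by
  split <;> rfl

lemma pv_foldl_if_pair {α β : Type} (f : β → α → β) (a : β) (c : Prop) [Decidable c] (x y : α) :
    List.foldl f a (if c then [x, y] else []) = if c then f (f a x) y else a := by
  split <;> rfl

lemma pv_digitChar_isDigit {m : Nat} (h : m < 10) : (Nat.digitChar m).isDigit = true := by
  interval_cases m <;> decide

lemma pv_toDigits_isDigit : ∀ (n : Nat), ∀ c ∈ Nat.toDigits 10 n, c.isDigit = true := by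
  intro n
  induction n using Nat.strong_induction_on with
  | _ n ih =>
    rw [Nat.toDigits_eq_if (by norm_num)]
    split
    · intro c hc
      simp only [List.mem_singleton] at hc
      subst hc; exact pv_digitChar_isDigit (by omega)
    · intro c hc
      rcases List.mem_append.mp hc with h | h
      · exact ih (n / 10) (by omega) c h
      · simp only [List.mem_singleton] at h
        subst h; exact pv_digitChar_isDigit (by omega)

def pvVal (cs : List Char) : Nat := cs.foldl (fun a c => 10 * a + (c.toNat - 48)) 0

lemma pv_foldl_val (cs : List Char) (a : Nat) :
    cs.foldl (fun a c => 10 * a + (c.toNat - 48)) a = a * 10 ^ cs.length + pvVal cs := by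
  induction cs generalizing a with
  | nil => simp [pvVal]
  | cons c cs ih =>
    simp only [List.foldl_cons, pvVal, List.length_cons]
    rw [ih, ih (10 * 0 + (c.toNat - 48))]
    ring

lemma pv_val_toDigits : ∀ (n : Nat), pvVal (Nat.toDigits 10 n) = n := by
  intro n
  induction n using Nat.strong_induction_on with
  | _ n ih =>
    rw [Nat.toDigits_eq_if (by norm_num)]
    split
    · rename_i h
      interval_cases n <;> decide
    · rename_i h
      have h10 : 10 ≤ n := by omega
      simp only [pvVal, List.foldl_append, List.foldl_cons, List.foldl_nil]
      rw [pv_foldl_val]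
      have hv := ih (n / 10) (by omega)
      have hd : ((n % 10).digitChar.toNat - 48) = n % 10 := by
        have h9 : n % 10 < 10 := by omega
        interval_cases h : n % 10 <;> decide
      rw [hv, hd]
      simp only [Nat.zero_mul, Nat.zero_add]
      omega

lemma pv_toChars_eq {n : Int} (h : 0 ≤ n) : PySem.Int.toChars n = Nat.toDigits 10 n.toNat := by
  simp [PySem.Int.toChars, not_lt.mpr h]

lemma pv_toChars_no_underscore {n : Int} (h : 0 ≤ n) : '_' ∉ PySem.Int.toChars n := by
  rw [pv_toChars_eq h]
  intro hmem
  have := pv_toDigits_isDigit n.toNat _ hmem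
  simp [Char.isDigit] at this

lemma pv_toChars_inj {m n : Int} (hm : 0 ≤ m) (hn : 0 ≤ n)
    (h : PySem.Int.toChars m = PySem.Int.toChars n) : m = n := by
  rw [pv_toChars_eq hm, pv_toChars_eq hn] at h
  have := congrArg pvVal h
  rw [pv_val_toDigits, pv_val_toDigits] at this
  omega

lemma pv_sep : ∀ (xs : List Char) {ys : List Char} (xs' : List Char) {ys' : List Char},
    xs ++ '_' :: ys = xs' ++ '_' :: ys' → '_' ∉ xs → '_' ∉ xs' → xs = xs' ∧ ys = ys' := by
  intro xs
  induction xs with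
  | nil =>
    intro ys xs' ys' h hx hx'
    cases xs' with
    | nil => simpa using h
    | cons a t =>
      simp only [List.nil_append, List.cons_append, List.cons.injEq] at h
      exact absurd (h.1 ▸ List.mem_cons_self ..) hx'
  | cons a t ih =>
    intro ys xs' ys' h hx hx'
    cases xs' with
    | nil =>
      simp only [List.cons_append, List.nil_append, List.cons.injEq] at h
      exact absurd (h.1.symm ▸ List.mem_cons_self ..) hx
    | cons a' t' =>
      simp only [List.cons_append, List.cons.injEq] at h
      obtain ⟨rfl, h2⟩ := h
      have := ih t' h2 (fun hm => hx (List.mem_cons_of_mem _ hm)) (fun hm => hx' (List.mem_cons_of_mem _ hm))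
      exact ⟨by rw [this.1], this.2⟩

lemma pv_node_inj {x y z x' y' z' : Int} (hx : 0 ≤ x) (hy : 0 ≤ y) (hz : 0 ≤ z)
    (hx' : 0 ≤ x') (hy' : 0 ≤ y') (hz' : 0 ≤ z')
    (h : pvNode x y z = pvNode x' y' z') : x = x' ∧ y = y' ∧ z = z' := by
  unfold pvNode at h
  have h' := congrArg String.toList h
  simp only [String.toList_ofList, List.append_assoc, List.cons_append, List.cons.injEq, true_and] at h'
  obtain ⟨h1, h2⟩ := pv_sep _ _ h' (pv_toChars_no_underscore hx) (pv_toChars_no_underscore hx')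
  simp only [List.cons.injEq, true_and] at h2
  obtain ⟨h3, h4⟩ := pv_sep _ _ h2 (pv_toChars_no_underscore hy) (pv_toChars_no_underscore hy')
  simp only [List.cons.injEq, true_and] at h4
  exact ⟨pv_toChars_inj hx hx' h1, pv_toChars_inj hy hy' h3, pv_toChars_inj hz hz' h4⟩

lemma pv_flatMap_single {α β : Type} (xs : List α) (h : α → List β) (t : α)
    (ht : t ∈ xs) (hnd : xs.Nodup) (hz : ∀ a ∈ xs, a ≠ t → h a = []) :
    xs.flatMap h = h t := by
  induction xs with
  | nil => cases ht
  | cons a rest ih =>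
    rw [List.flatMap_cons]
    rcases List.mem_cons.mp ht with rfl | hmem
    · have : rest.flatMap h = [] := by
        apply List.flatMap_eq_nil_iff.mpr
        intro b hb
        exact hz b (List.mem_cons_of_mem _ hb) (fun hbt => (List.nodup_cons.mp hnd).1 (hbt ▸ hb))
      rw [this, List.append_nil]
    · have hat : a ≠ t := fun hat => (List.nodup_cons.mp hnd).1 (hat ▸ hmem)
      rw [hz a (List.mem_cons_self ..) hat, List.nil_append]
      exact ih hmem (List.nodup_cons.mp hnd).2 (fun b hb => hz b (List.mem_cons_of_mem _ hb))

lemma pv_set_update_mem_noop {s : PySem.Set String} : ∀ {xs : List String},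
    (∀ x ∈ xs, x ∈ s) → PySem.Set.update s xs = s := by
  intro xs
  induction xs generalizing s with
  | nil => intro; rfl
  | cons x rest ih =>
    intro hmem
    rw [PySem.Set.update_cons, PySem.Set.add_of_mem (hmem x (List.mem_cons_self ..))]
    exact ih (fun y hy => hmem y (List.mem_cons_of_mem _ hy))

lemma pv_set_update_filter {x : String} : ∀ {ys : List String} {s : PySem.Set String}, x ∈ s →
    PySem.Set.update s ys = PySem.Set.update s (ys.filter (fun y => y != x)) := by
  intro ys
  induction ys with
  | nil => intro s h; rfl
  | cons y rest ih =>
    intro s h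
    by_cases hxy : y = x
    · subst hxy
      rw [List.filter_cons_of_neg (by simp), PySem.Set.update_cons, PySem.Set.add_of_mem h, ih h]
    · rw [List.filter_cons_of_pos (by simp [hxy]), PySem.Set.update_cons, PySem.Set.update_cons]
      exact ih (by simp [PySem.Set.mem_add, h])

def pvStep (a : PySem.Dict String (PySem.Set String)) (p : String × String) :
    PySem.Dict String (PySem.Set String) :=
  a.modify p.1 PySem.Set.empty (fun st => PySem.Set.add st p.2)

lemma pv_getD_foldl_ops : ∀ (ops : List (String × String)) (a : PySem.Dict String (PySem.Set String)) (q : String),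
    (ops.foldl pvStep a).getD q PySem.Set.empty
      = PySem.Set.update (a.getD q PySem.Set.empty) ((ops.filter (fun p => p.1 == q)).map (·.2)) := by
  intro ops
  induction ops with
  | nil => intro a q; rfl
  | cons p rest ih =>
    intro a q
    rw [List.foldl_cons, ih]
    by_cases hpq : p.1 = q
    · rw [List.filter_cons_of_pos (by simp [hpq]), List.map_cons, PySem.Set.update_cons]
      congr 1
      show (pvStep a p).getD q _ = _
      unfold pvStep
      rw [PySem.Dict.getD_modify, if_pos hpq.symm, hpq]
    · rw [List.filter_cons_of_neg (by simp [hpq])]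
      congr 1
      show (pvStep a p).getD q _ = _
      unfold pvStep
      rw [PySem.Dict.getD_modify, if_neg (fun hh => hpq hh.symm)]

def pvNodeT (t : Int × Int × Int) : String := pvNode t.1 t.2.1 t.2.2

def pvTriples (days shifts P : Int) : List (Int × Int × Int) :=
  (PySem.List.pyRange 0 P 1).flatMap (fun L =>
    (PySem.List.pyRange 0 days 1).flatMap (fun d =>
      (PySem.List.pyRange 0 shifts 1).map (fun s => (L, d, s))))

-- the full out-neighbour list of node (L,d,s) in A's first-occurrence order (proof-side bridge)
def pvNbrs (days : Int) (shifts : Int) (nurses_per_shift : Int) (L : Int) (d : Int) (s : Int) : List String :=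
  let nbrs := (PySem.List.pyRange (s+1) shifts 1).map (fun t => pvNode L d t)
  let nbrs := if s = shifts - 1 ∧ d < days - 1 then
      nbrs ++ pvNode L (d+1) 0 :: (PySem.List.pyRange 0 L 1).map (fun l1 => pvNode l1 (d+1) 0)
    else nbrs
  (PySem.List.pyRange (L+1) nurses_per_shift 1).foldl (fun nbrs l2 =>
    let nbrs := nbrs ++ pvNode l2 d s ::
      ((PySem.List.pyRange 0 shifts 1).filter (fun t => t != s)).map (fun t => pvNode l2 d t)
    if s = shifts - 1 ∧ d < days - 1 then nbrs ++ [pvNode l2 (d+1) 0] else nbrs) nbrs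

def pvG2 (days shifts L d s : Int) : List (String × String) :=
  (PySem.List.pyRange (s+1) shifts 1).map (fun s_ => (pvNode L d s, pvNode L d s_))
  ++ (if s = shifts - 1 ∧ d < days - 1 then [(pvNode L d s, pvNode L (d+1) 0)] else [])

def pvG3 (days shifts l1 l2 d s : Int) : List (String × String) :=
  (pvNode l1 d s, pvNode l2 d s) ::
    ((PySem.List.pyRange 0 shifts 1).map (fun s_ => (pvNode l1 d s, pvNode l2 d s_))
     ++ (if s = shifts - 1 ∧ d < days - 1 then
          [(pvNode l1 d s, pvNode l2 (d+1) 0), (pvNode l2 d s, pvNode l1 (d+1) 0)] else []))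

def pvOps (days shifts P : Int) : List (String × String) :=
  (pvTriples days shifts P).flatMap (fun t => pvG2 days shifts t.1 t.2.1 t.2.2)
  ++ (PySem.List.pyRange 0 P 1).flatMap (fun l1 =>
      (PySem.List.pyRange (l1+1) P 1).flatMap (fun l2 =>
        (PySem.List.pyRange 0 days 1).flatMap (fun d =>
          (PySem.List.pyRange 0 shifts 1).flatMap (fun s => pvG3 days shifts l1 l2 d s))))

def pvAdj0 (days shifts P : Int) : PySem.Dict String (PySem.Set String) :=
  (pvTriples days shifts P).foldl (fun acc t => acc.insert (pvNodeT t) PySem.Set.empty) PySem.Dict.empty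

lemma pv_A_shape (nurses days shifts P : Int) :
    nsp_to_graph_coloring nurses days shifts P
      = ((pvOps days shifts P).foldl pvStep (pvAdj0 days shifts P)).items := by
  unfold nsp_to_graph_coloring pvOps pvAdj0 pvTriples pvG2 pvG3 pvStep
  simp only [List.foldl_append, List.foldl_flatMap, List.foldl_map, List.foldl_cons,
    pv_foldl_if_singleton, pv_foldl_if_pair, pvNodeT]

def pvChunkB (days shifts d s l2 : Int) : List String :=
  pvNode l2 d s ::
    (((PySem.List.pyRange 0 shifts 1).filter (fun t => t != s)).map (fun t => pvNode l2 d t)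
     ++ (if s = shifts - 1 ∧ d < days - 1 then [pvNode l2 (d+1) 0] else []))

lemma pv_nbrs_eq (days shifts P L d s : Int) :
    pvNbrs days shifts P L d s
      = ((PySem.List.pyRange (s+1) shifts 1).map (fun t => pvNode L d t)
         ++ (if s = shifts - 1 ∧ d < days - 1 then
              pvNode L (d+1) 0 :: (PySem.List.pyRange 0 L 1).map (fun l1 => pvNode l1 (d+1) 0)
            else []))
        ++ (PySem.List.pyRange (L+1) P 1).flatMap (pvChunkB days shifts d s) := by
  unfold pvNbrs
  have hbody : (fun (nbrs : List String) (l2 : Int) =>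
      let nbrs := nbrs ++ pvNode l2 d s ::
        ((PySem.List.pyRange 0 shifts 1).filter (fun t => t != s)).map (fun t => pvNode l2 d t)
      if s = shifts - 1 ∧ d < days - 1 then nbrs ++ [pvNode l2 (d+1) 0] else nbrs)
      = fun nbrs l2 => nbrs ++ pvChunkB days shifts d s l2 := by
    funext nbrs l2
    simp only [pvChunkB]
    split <;> simp
  rw [hbody, PySem.List.foldl_append_eq_flatMap]
  split <;> simp

lemma pv_mem_triples {days shifts P L d s : Int} :
    (L, d, s) ∈ pvTriples days shifts P ↔ (0 ≤ L ∧ L < P) ∧ (0 ≤ d ∧ d < days) ∧ (0 ≤ s ∧ s < shifts) := by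
  simp [pvTriples, List.mem_flatMap, List.mem_map, PySem.List.mem_pyRange_one]

lemma pv_mem_range0 {b x : Int} (h : x ∈ PySem.List.pyRange 0 b 1) : 0 ≤ x ∧ x < b := by
  have := PySem.List.mem_pyRange_one.mp h
  omega

lemma pv_keys_nodup (days shifts P : Int) : ((pvTriples days shifts P).map pvNodeT).Nodup := by
  unfold pvTriples
  simp only [List.map_flatMap, List.map_map]
  rw [List.nodup_flatMap]
  constructor
  · intro L hL
    obtain ⟨hL0, -⟩ := pv_mem_range0 hL
    rw [List.nodup_flatMap]
    constructor
    · intro d hd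
      obtain ⟨hd0, -⟩ := pv_mem_range0 hd
      refine (PySem.List.nodup_pyRange_one 0 shifts).map_on ?_
      intro x hx y hy hxy
      simp only [Function.comp, pvNodeT] at hxy
      exact (pv_node_inj hL0 hd0 (pv_mem_range0 hx).1 hL0 hd0 (pv_mem_range0 hy).1 hxy).2.2
    · refine List.Pairwise.imp_of_mem ?_ (PySem.List.pairwise_lt_pyRange_one 0 days)
      intro d d' hd hd' hdd' a ha ha'
      simp only [List.mem_map, Function.comp, pvNodeT] at ha ha'
      obtain ⟨x, hx, hax⟩ := ha
      obtain ⟨y, hy, hay⟩ := ha'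
      have h := pv_node_inj hL0 (pv_mem_range0 hd).1 (pv_mem_range0 hx).1
        hL0 (pv_mem_range0 hd').1 (pv_mem_range0 hy).1 (hax.trans hay.symm)
      omega
  · refine List.Pairwise.imp_of_mem ?_ (PySem.List.pairwise_lt_pyRange_one 0 P)
    intro L L' hL hL' hLL' a ha ha'
    simp only [List.mem_flatMap, List.mem_map, Function.comp, pvNodeT] at ha ha'
    obtain ⟨d, hd, x, hx, hax⟩ := ha
    obtain ⟨d', hd', y, hy, hay⟩ := ha'
    have h := pv_node_inj (pv_mem_range0 hL).1 (pv_mem_range0 hd).1 (pv_mem_range0 hx).1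
      (pv_mem_range0 hL').1 (pv_mem_range0 hd').1 (pv_mem_range0 hy).1 (hax.trans hay.symm)
    omega

lemma pv_triples_nodup (days shifts P : Int) : (pvTriples days shifts P).Nodup :=
  (pv_keys_nodup days shifts P).of_map

lemma pv_adj0_items (days shifts P : Int) :
    (pvAdj0 days shifts P).items = (pvTriples days shifts P).map (fun t => (pvNodeT t, PySem.Set.empty)) := by
  unfold pvAdj0
  rw [PySem.Dict.items_foldl_insert_fresh _ pvNodeT _ _
    (fun a _ => PySem.Dict.contains_empty _) (pv_keys_nodup days shifts P)]
  rfl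

lemma pv_adj0_keys (days shifts P : Int) :
    (pvAdj0 days shifts P).keys = (pvTriples days shifts P).map pvNodeT := by
  show ((pvAdj0 days shifts P).items.map (·.1)) = _
  rw [pv_adj0_items]
  simp

lemma pv_adj0_getD {days shifts P : Int} {t : Int × Int × Int} (ht : t ∈ pvTriples days shifts P) :
    (pvAdj0 days shifts P).getD (pvNodeT t) PySem.Set.empty = PySem.Set.empty := by
  refine PySem.Dict.getD_of_mem_items _ ?_ ?_ _
  · rw [pv_adj0_items]
    exact List.mem_map.mpr ⟨t, ht, rfl⟩
  · rw [pv_adj0_keys]; exact pv_keys_nodup days shifts P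

lemma pv_ops_keys_mem (days shifts P : Int) :
    ∀ p ∈ pvOps days shifts P, p.1 ∈ (pvTriples days shifts P).map pvNodeT := by
  intro p hp
  rw [List.mem_map]
  unfold pvOps at hp
  rcases List.mem_append.mp hp with h | h
  · obtain ⟨t, ht, hg⟩ := List.mem_flatMap.mp h
    refine ⟨t, ht, ?_⟩
    unfold pvG2 at hg
    rcases List.mem_append.mp hg with h2 | h2
    · obtain ⟨s_, -, he⟩ := List.mem_map.mp h2
      rw [← he]; rfl
    · split at h2
      · simp only [List.mem_singleton] at h2; rw [h2]; rfl
      · cases h2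
  · obtain ⟨l1, hl1, h⟩ := List.mem_flatMap.mp h
    obtain ⟨l2, hl2, h⟩ := List.mem_flatMap.mp h
    obtain ⟨d, hd, h⟩ := List.mem_flatMap.mp h
    obtain ⟨s, hs, h⟩ := List.mem_flatMap.mp h
    obtain ⟨hl10, hl1P⟩ := pv_mem_range0 hl1
    have hl2b := PySem.List.mem_pyRange_one.mp hl2
    have ht1 : (l1, d, s) ∈ pvTriples days shifts P := pv_mem_triples.mpr
      ⟨⟨hl10, hl1P⟩, pv_mem_range0 hd, pv_mem_range0 hs⟩
    have ht2 : (l2, d, s) ∈ pvTriples days shifts P := pv_mem_triples.mpr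
      ⟨⟨by omega, by omega⟩, pv_mem_range0 hd, pv_mem_range0 hs⟩
    unfold pvG3 at h
    rcases List.mem_cons.mp h with h2 | h2
    · exact ⟨(l1, d, s), ht1, by rw [h2]; rfl⟩
    rcases List.mem_append.mp h2 with h3 | h3
    · obtain ⟨s_, -, he⟩ := List.mem_map.mp h3
      exact ⟨(l1, d, s), ht1, by rw [← he]; rfl⟩
    · split at h3
      · rcases List.mem_cons.mp h3 with h4 | h4
        · exact ⟨(l1, d, s), ht1, by rw [h4]; rfl⟩
        · simp only [List.mem_singleton] at h4
          exact ⟨(l2, d, s), ht2, by rw [h4]; rfl⟩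
      · cases h3

lemma pv_final_keys (days shifts P : Int) :
    ((pvOps days shifts P).foldl pvStep (pvAdj0 days shifts P)).keys
      = (pvTriples days shifts P).map pvNodeT := by
  have h := PySem.Dict.keys_foldl_modify_key (pvOps days shifts P) (fun p => p.1)
    PySem.Set.empty (fun _ p st => PySem.Set.add st p.2) (pvAdj0 days shifts P)
  simp only [] at h
  unfold pvStep
  rw [h, pv_adj0_keys]
  exact pv_set_update_mem_noop (by
    intro x hx
    obtain ⟨p, hp, rfl⟩ := List.mem_map.mp hx
    exact pv_ops_keys_mem days shifts P p hp)

lemma pv_final_nodup (days shifts P : Int) :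
    ((pvOps days shifts P).foldl pvStep (pvAdj0 days shifts P)).keys.Nodup := by
  rw [pv_final_keys]
  exact pv_keys_nodup days shifts P

lemma pv_filter_g2_self (days shifts L d s : Int) :
    (pvG2 days shifts L d s).filter (fun p => p.1 == pvNode L d s) = pvG2 days shifts L d s := by
  refine List.filter_eq_self.mpr ?_
  intro p hp
  unfold pvG2 at hp
  rcases List.mem_append.mp hp with h | h
  · obtain ⟨s_, -, he⟩ := List.mem_map.mp h
    rw [← he]; exact beq_self_eq_true _
  · split at h
    · simp only [List.mem_singleton] at h; rw [h]; exact beq_self_eq_true _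
    · cases h

lemma pv_filter_g2_ne (days shifts L' d' s' L d s : Int)
    (hL' : 0 ≤ L') (hd' : 0 ≤ d') (hs' : 0 ≤ s') (hL : 0 ≤ L) (hd : 0 ≤ d) (hs : 0 ≤ s)
    (hne : ¬(L' = L ∧ d' = d ∧ s' = s)) :
    (pvG2 days shifts L' d' s').filter (fun p => p.1 == pvNode L d s) = [] := by
  have hkey : (pvNode L' d' s' == pvNode L d s) = false := by
    rw [beq_eq_false_iff_ne]
    intro h
    exact hne (pv_node_inj hL' hd' hs' hL hd hs h)
  refine List.filter_eq_nil_iff.mpr ?_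
  intro p hp
  unfold pvG2 at hp
  rcases List.mem_append.mp hp with h | h
  · obtain ⟨s_, -, he⟩ := List.mem_map.mp h
    rw [← he]; simp [hkey]
  · split at h
    · simp only [List.mem_singleton] at h; rw [h]; simp [hkey]
    · cases h

lemma pv_filter_g3_main (days shifts l1 l2 d s L : Int)
    (hl1 : l1 = L) (hl2 : (pvNode l2 d s == pvNode L d s) = false) :
    (pvG3 days shifts l1 l2 d s).filter (fun p => p.1 == pvNode L d s)
      = (pvNode L d s, pvNode l2 d s) ::
          ((PySem.List.pyRange 0 shifts 1).map (fun s_ => (pvNode L d s, pvNode l2 d s_))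
           ++ (if s = shifts - 1 ∧ d < days - 1 then [(pvNode L d s, pvNode l2 (d+1) 0)] else [])) := by
  subst hl1
  unfold pvG3
  rw [List.filter_cons]
  simp only [beq_self_eq_true, if_pos]
  rw [List.filter_append]
  have h1 : List.filter (fun p => p.1 == pvNode l1 d s)
      ((PySem.List.pyRange 0 shifts 1).map (fun s_ => (pvNode l1 d s, pvNode l2 d s_)))
      = (PySem.List.pyRange 0 shifts 1).map (fun s_ => (pvNode l1 d s, pvNode l2 d s_)) := by
    refine List.filter_eq_self.mpr ?_
    intro p hp
    obtain ⟨s_, -, he⟩ := List.mem_map.mp hp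
    rw [← he]; exact beq_self_eq_true _
  rw [h1]
  congr 1
  split
  · rw [List.filter_cons, List.filter_cons]
    simp [hl2]
  · rfl

lemma pv_filter_g3_recv (days shifts l1 l2 d s L : Int)
    (hl2 : l2 = L) (hl1 : (pvNode l1 d s == pvNode L d s) = false) :
    (pvG3 days shifts l1 l2 d s).filter (fun p => p.1 == pvNode L d s)
      = (if s = shifts - 1 ∧ d < days - 1 then [(pvNode L d s, pvNode l1 (d+1) 0)] else []) := by
  subst hl2
  unfold pvG3
  rw [List.filter_cons]
  simp only [hl1, if_neg, Bool.false_eq_true, not_false_eq_true]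
  rw [List.filter_append]
  have h1 : List.filter (fun p => p.1 == pvNode l2 d s)
      ((PySem.List.pyRange 0 shifts 1).map (fun s_ => (pvNode l1 d s, pvNode l2 d s_))) = [] := by
    refine List.filter_eq_nil_iff.mpr ?_
    intro p hp
    obtain ⟨s_, -, he⟩ := List.mem_map.mp hp
    rw [← he]; simp [hl1]
  rw [h1, List.nil_append]
  split
  · rw [List.filter_cons, List.filter_cons]
    simp [hl1]
  · rfl

lemma pv_filter_g3_none (days shifts l1 l2 d s L dd ss : Int)
    (h1 : (pvNode l1 d s == pvNode L dd ss) = false)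
    (h2 : (pvNode l2 d s == pvNode L dd ss) = false) :
    (pvG3 days shifts l1 l2 d s).filter (fun p => p.1 == pvNode L dd ss) = [] := by
  refine List.filter_eq_nil_iff.mpr ?_
  intro p hp
  unfold pvG3 at hp
  rcases List.mem_cons.mp hp with h | h
  · rw [h]; simp [h1]
  rcases List.mem_append.mp h with h3 | h3
  · obtain ⟨s_, -, he⟩ := List.mem_map.mp h3
    rw [← he]; simp [h1]
  · split at h3
    · rcases List.mem_cons.mp h3 with h4 | h4
      · rw [h4]; simp [h1]
      · simp only [List.mem_singleton] at h4; rw [h4]; simp [h2]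
    · cases h3

lemma pv_nbf {x y z x' y' z' : Int} (hx : 0 ≤ x) (hy : 0 ≤ y) (hz : 0 ≤ z)
    (hx' : 0 ≤ x') (hy' : 0 ≤ y') (hz' : 0 ≤ z')
    (h : ¬(x = x' ∧ y = y' ∧ z = z')) : (pvNode x y z == pvNode x' y' z') = false := by
  rw [beq_eq_false_iff_ne]
  intro he
  exact h (pv_node_inj hx hy hz hx' hy' hz' he)

def pvInner (days shifts l1 l2 L d s : Int) : List (String × String) :=
  (PySem.List.pyRange 0 days 1).flatMap (fun d' =>
    (PySem.List.pyRange 0 shifts 1).flatMap (fun s' =>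
      (pvG3 days shifts l1 l2 d' s').filter (fun p => p.1 == pvNode L d s)))

lemma pv_inner_none (days shifts l1 l2 L d s : Int)
    (hl1 : 0 ≤ l1) (hl2 : 0 ≤ l2) (hL : 0 ≤ L) (hd0 : 0 ≤ d) (hs0 : 0 ≤ s)
    (h1 : l1 ≠ L) (h2 : l2 ≠ L) :
    pvInner days shifts l1 l2 L d s = [] := by
  unfold pvInner
  rw [List.flatMap_eq_nil_iff]
  intro d' hd'
  rw [List.flatMap_eq_nil_iff]
  intro s' hs'
  exact pv_filter_g3_none _ _ _ _ _ _ _ _ _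
    (pv_nbf hl1 (pv_mem_range0 hd').1 (pv_mem_range0 hs').1 hL hd0 hs0 (fun hc => h1 hc.1))
    (pv_nbf hl2 (pv_mem_range0 hd').1 (pv_mem_range0 hs').1 hL hd0 hs0 (fun hc => h2 hc.1))

lemma pv_inner_main (days shifts l2 L d s : Int)
    (hL : 0 ≤ L) (hl2 : L < l2) (hd : 0 ≤ d ∧ d < days) (hs : 0 ≤ s ∧ s < shifts) :
    pvInner days shifts L l2 L d s
      = (pvNode L d s, pvNode l2 d s) ::
          ((PySem.List.pyRange 0 shifts 1).map (fun s_ => (pvNode L d s, pvNode l2 d s_))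
           ++ (if s = shifts - 1 ∧ d < days - 1 then [(pvNode L d s, pvNode l2 (d+1) 0)] else [])) := by
  have hl20 : 0 ≤ l2 := by omega
  unfold pvInner
  rw [pv_flatMap_single _ _ d (PySem.List.mem_pyRange_one.mpr (by omega))
      (PySem.List.nodup_pyRange_one 0 days) ?_]
  · rw [pv_flatMap_single _ _ s (PySem.List.mem_pyRange_one.mpr (by omega))
      (PySem.List.nodup_pyRange_one 0 shifts) ?_]
    · exact pv_filter_g3_main _ _ _ _ _ _ _ rfl
        (pv_nbf hl20 hd.1 hs.1 hL hd.1 hs.1 (fun hc => by omega))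
    · intro s' hs' hne
      exact pv_filter_g3_none _ _ _ _ _ _ _ _ _
        (pv_nbf hL hd.1 (pv_mem_range0 hs').1 hL hd.1 hs.1 (fun hc => hne hc.2.2))
        (pv_nbf hl20 hd.1 (pv_mem_range0 hs').1 hL hd.1 hs.1 (fun hc => by omega))
  · intro d' hd' hne
    rw [List.flatMap_eq_nil_iff]
    intro s' hs'
    exact pv_filter_g3_none _ _ _ _ _ _ _ _ _
      (pv_nbf hL (pv_mem_range0 hd').1 (pv_mem_range0 hs').1 hL hd.1 hs.1 (fun hc => hne hc.2.1))
      (pv_nbf hl20 (pv_mem_range0 hd').1 (pv_mem_range0 hs').1 hL hd.1 hs.1 (fun hc => by omega))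

lemma pv_inner_recv (days shifts l1 L d s : Int)
    (hl1 : 0 ≤ l1) (hl1L : l1 < L) (hd : 0 ≤ d ∧ d < days) (hs : 0 ≤ s ∧ s < shifts) :
    pvInner days shifts l1 L L d s
      = (if s = shifts - 1 ∧ d < days - 1 then [(pvNode L d s, pvNode l1 (d+1) 0)] else []) := by
  have hL : 0 ≤ L := by omega
  unfold pvInner
  rw [pv_flatMap_single _ _ d (PySem.List.mem_pyRange_one.mpr (by omega))
      (PySem.List.nodup_pyRange_one 0 days) ?_]
  · rw [pv_flatMap_single _ _ s (PySem.List.mem_pyRange_one.mpr (by omega))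
      (PySem.List.nodup_pyRange_one 0 shifts) ?_]
    · exact pv_filter_g3_recv _ _ _ _ _ _ _ rfl
        (pv_nbf hl1 hd.1 hs.1 hL hd.1 hs.1 (fun hc => by omega))
    · intro s' hs' hne
      exact pv_filter_g3_none _ _ _ _ _ _ _ _ _
        (pv_nbf hl1 hd.1 (pv_mem_range0 hs').1 hL hd.1 hs.1 (fun hc => by omega))
        (pv_nbf hL hd.1 (pv_mem_range0 hs').1 hL hd.1 hs.1 (fun hc => hne hc.2.2))
  · intro d' hd' hne
    rw [List.flatMap_eq_nil_iff]
    intro s' hs'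
    exact pv_filter_g3_none _ _ _ _ _ _ _ _ _
      (pv_nbf hl1 (pv_mem_range0 hd').1 (pv_mem_range0 hs').1 hL hd.1 hs.1 (fun hc => by omega))
      (pv_nbf hL (pv_mem_range0 hd').1 (pv_mem_range0 hs').1 hL hd.1 hs.1 (fun hc => hne hc.2.1))

lemma pv_filter_ops (days shifts P L d s : Int)
    (hL : 0 ≤ L ∧ L < P) (hd : 0 ≤ d ∧ d < days) (hs : 0 ≤ s ∧ s < shifts) :
    (pvOps days shifts P).filter (fun p => p.1 == pvNode L d s)
      = pvG2 days shifts L d s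
        ++ ((PySem.List.pyRange 0 L 1).flatMap (fun l1 =>
              if s = shifts - 1 ∧ d < days - 1 then [(pvNode L d s, pvNode l1 (d+1) 0)] else [])
           ++ (PySem.List.pyRange (L+1) P 1).flatMap (fun l2 =>
              (pvNode L d s, pvNode l2 d s) ::
                ((PySem.List.pyRange 0 shifts 1).map (fun s_ => (pvNode L d s, pvNode l2 d s_))
                 ++ (if s = shifts - 1 ∧ d < days - 1 then [(pvNode L d s, pvNode l2 (d+1) 0)] else [])))) := by
  unfold pvOps
  rw [List.filter_append]
  congr 1
  · -- intra-layer ops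
    rw [List.filter_flatMap]
    rw [pv_flatMap_single _ _ (L, d, s)
        (pv_mem_triples.mpr ⟨hL, hd, hs⟩) (pv_triples_nodup days shifts P) ?_]
    · exact pv_filter_g2_self days shifts L d s
    · rintro ⟨a, b, c⟩ ht' hne
      obtain ⟨ha, hb, hc⟩ := pv_mem_triples.mp ht'
      refine pv_filter_g2_ne days shifts a b c L d s ha.1 hb.1 hc.1 hL.1 hd.1 hs.1 ?_
      rintro ⟨rfl, rfl, rfl⟩
      exact hne rfl
  · -- inter-layer ops
    have hstep : (List.filter (fun p => p.1 == pvNode L d s)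
        ((PySem.List.pyRange 0 P 1).flatMap (fun l1 =>
          (PySem.List.pyRange (l1+1) P 1).flatMap (fun l2 =>
            (PySem.List.pyRange 0 days 1).flatMap (fun d_ =>
              (PySem.List.pyRange 0 shifts 1).flatMap (fun s_ => pvG3 days shifts l1 l2 d_ s_))))))
        = (PySem.List.pyRange 0 P 1).flatMap (fun l1 =>
            (PySem.List.pyRange (l1+1) P 1).flatMap (fun l2 => pvInner days shifts l1 l2 L d s)) := by
      simp only [List.filter_flatMap, pvInner]
    rw [hstep, PySem.List.pyRange_one_append 0 L P (by omega) (by omega), List.flatMap_append,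
        PySem.List.pyRange_one_cons (show (L:Int) < P by omega), List.flatMap_cons]
    congr 1
    · -- l1 < L segment
      apply List.flatMap_congr
      intro l1 hl1
      have hb := pv_mem_range0 hl1
      rw [pv_flatMap_single _ _ L (PySem.List.mem_pyRange_one.mpr (by omega))
          (PySem.List.nodup_pyRange_one _ _) ?_]
      · exact pv_inner_recv days shifts l1 L d s hb.1 hb.2 hd hs
      · intro l2 hl2 hne
        have hb2 := PySem.List.mem_pyRange_one.mp hl2
        exact pv_inner_none days shifts l1 l2 L d s hb.1 (by omega) hL.1 hd.1 hs.1 (by omega) hne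
    · -- l1 = L head, then the empty l1 > L segment
      have hnil : (PySem.List.pyRange (L+1) P 1).flatMap (fun l1 =>
          (PySem.List.pyRange (l1+1) P 1).flatMap (fun l2 => pvInner days shifts l1 l2 L d s)) = [] := by
        rw [List.flatMap_eq_nil_iff]
        intro l1 hl1
        have hb := PySem.List.mem_pyRange_one.mp hl1
        rw [List.flatMap_eq_nil_iff]
        intro l2 hl2
        have hb2 := PySem.List.mem_pyRange_one.mp hl2
        exact pv_inner_none days shifts l1 l2 L d s (by omega) (by omega) hL.1 hd.1 hs.1 (by omega) (by omega)
      rw [hnil, List.append_nil]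
      apply List.flatMap_congr
      intro l2 hl2
      have hb2 := PySem.List.mem_pyRange_one.mp hl2
      exact pv_inner_main days shifts l2 L d s hL.1 (by omega) hd hs

lemma pv_filter_map_node (shifts l2 d s : Int) (hl2 : 0 ≤ l2) (hd : 0 ≤ d) (hs : 0 ≤ s) :
    ((PySem.List.pyRange 0 shifts 1).filter (fun t => t != s)).map (fun t => pvNode l2 d t)
      = ((PySem.List.pyRange 0 shifts 1).map (fun t => pvNode l2 d t)).filter
          (fun y => y != pvNode l2 d s) := by
  rw [List.filter_map]
  congr 1
  apply List.filter_congr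
  intro t ht
  have ht0 := (pv_mem_range0 ht).1
  by_cases hts : t = s
  · subst hts; simp
  · have : (pvNode l2 d t == pvNode l2 d s) = false :=
      pv_nbf hl2 hd ht0 hl2 hd hs (fun hc => hts hc.2.2)
    simp [Function.comp, bne, this, hts]

lemma pv_update_chunks (e : Int → String) (full tl : Int → List String) :
    ∀ (ls : List Int) (S : PySem.Set String),
    PySem.Set.update S (ls.flatMap (fun l => e l :: (full l ++ tl l)))
      = PySem.Set.update S (ls.flatMap (fun l => e l :: ((full l).filter (fun y => y != e l) ++ tl l))) := by
  intro ls
  induction ls with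
  | nil => intro S; rfl
  | cons l rest ih =>
    intro S
    rw [List.flatMap_cons, List.flatMap_cons, PySem.Set.update_append, PySem.Set.update_append,
        PySem.Set.update_cons, PySem.Set.update_cons, PySem.Set.update_append, PySem.Set.update_append]
    rw [← pv_set_update_filter (by simp [PySem.Set.mem_add] : e l ∈ S.add (e l))]
    exact ih _

lemma pv_getD_final (days shifts P L d s : Int)
    (hL : 0 ≤ L ∧ L < P) (hd : 0 ≤ d ∧ d < days) (hs : 0 ≤ s ∧ s < shifts) :
    ((pvOps days shifts P).foldl pvStep (pvAdj0 days shifts P)).getD (pvNode L d s) PySem.Set.empty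
      = PySem.Set.ofList (pvNbrs days shifts P L d s) := by
  have h0 := pv_adj0_getD (t := (L, d, s)) (pv_mem_triples.mpr ⟨hL, hd, hs⟩)
  simp only [pvNodeT] at h0
  rw [pv_getD_foldl_ops, h0, pv_filter_ops days shifts P L d s hL hd hs, pv_nbrs_eq]
  unfold pvG2 pvChunkB
  by_cases hc : s = shifts - 1 ∧ d < days - 1
  · simp only [if_pos hc]
    simp only [List.map_append, List.map_flatMap, List.map_cons, List.map_map, List.map_nil,
      Function.comp_def]
    have hsing : ∀ (l : List Int) (f : Int → String), l.flatMap (fun a => [f a]) = l.map f := by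
      intro l f
      induction l with
      | nil => rfl
      | cons a t ih => simp [ih]
    rw [hsing]
    have hupd : ∀ xs : List String, PySem.Set.empty.update xs = PySem.Set.ofList xs := fun xs => rfl
    rw [hupd]
    have hfc : List.flatMap (fun l2 => pvNode l2 d s ::
          (List.map (fun t => pvNode l2 d t) (List.filter (fun t => t != s) (PySem.List.pyRange 0 shifts 1))
           ++ [pvNode l2 (d+1) 0])) (PySem.List.pyRange (L+1) P 1)
        = List.flatMap (fun l2 => pvNode l2 d s ::
          ((List.map (fun t => pvNode l2 d t) (PySem.List.pyRange 0 shifts 1)).filter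
              (fun y => y != pvNode l2 d s)
           ++ [pvNode l2 (d+1) 0])) (PySem.List.pyRange (L+1) P 1) := by
      apply List.flatMap_congr
      intro l2 hl2
      have hb := PySem.List.mem_pyRange_one.mp hl2
      rw [pv_filter_map_node shifts l2 d s (by omega) hd.1 hs.1]
    rw [hfc]
    simp only [List.append_assoc, List.cons_append]
    simp only [PySem.Set.ofList_append, PySem.Set.update_append, PySem.Set.update_cons,
      PySem.Set.update_nil]
    exact pv_update_chunks (fun l2 => pvNode l2 d s)
      (fun l2 => List.map (fun t => pvNode l2 d t) (PySem.List.pyRange 0 shifts 1))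
      (fun l2 => [pvNode l2 (d+1) 0]) _ _
  · simp only [if_neg hc]
    simp only [List.map_append, List.map_flatMap, List.map_cons, List.map_map, List.map_nil,
      Function.comp_def]
    have hnil2 : List.flatMap (fun a => ([] : List String)) (PySem.List.pyRange 0 L 1) = [] :=
      List.flatMap_eq_nil_iff.mpr (fun _ _ => rfl)
    rw [hnil2]
    simp only [List.append_nil, List.nil_append]
    have hupd : ∀ xs : List String, PySem.Set.empty.update xs = PySem.Set.ofList xs := fun xs => rfl
    rw [hupd]
    have hfc : List.flatMap (fun l2 => pvNode l2 d s ::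
          List.map (fun t => pvNode l2 d t) (List.filter (fun t => t != s) (PySem.List.pyRange 0 shifts 1)))
          (PySem.List.pyRange (L+1) P 1)
        = List.flatMap (fun l2 => pvNode l2 d s ::
          (List.map (fun t => pvNode l2 d t) (PySem.List.pyRange 0 shifts 1)).filter
            (fun y => y != pvNode l2 d s)) (PySem.List.pyRange (L+1) P 1) := by
      apply List.flatMap_congr
      intro l2 hl2
      have hb := PySem.List.mem_pyRange_one.mp hl2
      rw [pv_filter_map_node shifts l2 d s (by omega) hd.1 hs.1]
    rw [hfc]
    simp only [PySem.Set.ofList_append]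
    have hch := pv_update_chunks (fun l2 => pvNode l2 d s)
      (fun l2 => List.map (fun t => pvNode l2 d t) (PySem.List.pyRange 0 shifts 1))
      (fun _ => ([] : List String)) (PySem.List.pyRange (L+1) P 1)
      (PySem.Set.ofList (List.map (fun x => pvNode L d x) (PySem.List.pyRange (s+1) shifts 1)))
    simp only [List.append_nil] at hch
    exact hch

-- ===== id-arithmetic bridge (B side) =====
lemma pv_shiftR (a x y : Int) :
    PySem.List.pyRange (a+x) (a+y) 1 = (PySem.List.pyRange x y 1).map (fun t => a + t) := by
  rw [PySem.List.pyRange_one, PySem.List.pyRange_one, List.map_map]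
  have h : a + y - (a + x) = y - x := by ring
  rw [h]
  apply List.map_congr_left
  intro c hc
  show a + x + (c : Int) = a + (x + (c : Int))
  ring

lemma pv_stride (k off lo hi : Int) (hk : 0 < k) (h0 : 0 ≤ off) (h1 : off < k) :
    PySem.List.pyRange (lo*k+off) (hi*k) k = (PySem.List.pyRange lo hi 1).map (fun t => t*k + off) := by
  rw [PySem.List.pyRange_of_pos _ _ hk, PySem.List.pyRange_one, List.map_map]
  have hn : (if lo*k+off < hi*k then ((hi*k - (lo*k+off) + k - 1) / k).toNat else 0) = (hi - lo).toNat := by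
    by_cases h : lo < hi
    · have hle : (lo+1)*k ≤ hi*k := by
        apply mul_le_mul_of_nonneg_right (by omega) hk.le
      have hlt : lo*k+off < hi*k := by nlinarith
      rw [if_pos hlt]
      have he : hi*k - (lo*k+off) + k - 1 = (k - 1 - off) + (hi - lo)*k := by ring
      rw [he, Int.add_mul_ediv_right _ _ (ne_of_gt hk),
          Int.ediv_eq_zero_of_lt (by omega) (by omega)]
      omega
    · have hle : hi*k ≤ lo*k := by
        apply mul_le_mul_of_nonneg_right (by omega) hk.le
      rw [if_neg (by omega)]
      omega
  rw [hn]
  apply List.map_congr_left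
  intro c hc
  show lo*k+off + k*(c : Int) = (lo + (c:Int))*k + off
  ring

lemma pv_decode (q off k : Int) (hk : 0 < k) (h1 : 0 ≤ off) (h2 : off < k) :
    PySem.Int.floordiv (q*k+off) k = q ∧ PySem.Int.mod (q*k+off) k = off := by
  have hfd : PySem.Int.floordiv (q*k+off) k = q := by
    rw [PySem.Int.floordiv_eq_iff_of_pos hk]
    constructor
    · omega
    · have : (q+1)*k = q*k + k := by ring
      omega
  refine ⟨hfd, ?_⟩
  have := PySem.Int.floordiv_mul_add_mod (q*k+off) k
  rw [hfd] at this
  omega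

lemma pv_name_encode (D S L d s : Int) (hd : 0 ≤ d ∧ d < D) (hs : 0 ≤ s ∧ s < S) :
    pvName (D*S) S (L*(D*S) + d*S + s) = pvNode L d s := by
  have hS : 0 < S := by omega
  have hD : 0 < D := by omega
  have hDS : 0 < D*S := mul_pos hD hS
  have hoff1 : d*S + s < D*S := by
    have : (d+1)*S ≤ D*S := mul_le_mul_of_nonneg_right (by omega) hS.le
    nlinarith
  have hoff0 : 0 ≤ d*S + s := by
    have := mul_nonneg hd.1 hS.le
    omega
  have he : L*(D*S) + d*S + s = L*(D*S) + (d*S + s) := by ring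
  obtain ⟨hf1, hm1⟩ := pv_decode L (d*S + s) (D*S) hDS hoff0 hoff1
  obtain ⟨hf2, hm2⟩ := pv_decode d s S hS hs.1 hs.2
  unfold pvName
  rw [he, hf1, hm1, hf2, hm2]


lemma pv_concat (a S : Int) (hS : 0 ≤ S) : ∀ (m : Nat),
    (PySem.List.pyRange 0 (m:Int) 1).flatMap (fun x => PySem.List.pyRange (a + x*S) (a + x*S + S) 1)
      = PySem.List.pyRange a (a + (m:Int)*S) 1 := by
  intro m
  induction m with
  | zero => simp [PySem.List.pyRange_one_eq_nil]
  | succ k ih =>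
    have h1 : ((k+1 : Nat) : Int) = (k:Int) + 1 := by push_cast; ring
    rw [h1, PySem.List.pyRange_one_succ_right (by positivity), List.flatMap_append, ih,
        List.flatMap_cons, List.flatMap_nil, List.append_nil]
    have hkS : 0 ≤ (k:Int)*S := mul_nonneg (by positivity) hS
    have h2 : a + ((k:Int)+1)*S = a + (k:Int)*S + S := by ring
    rw [h2, (PySem.List.pyRange_one_append a (a + (k:Int)*S) (a + (k:Int)*S + S)
      (by omega) (by omega)).symm]

lemma pv_encode_range (D S Pn : Int) (hD : 0 ≤ D) (hS : 0 ≤ S) (hP : 0 ≤ Pn) :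
    (pvTriples D S Pn).map (fun t => t.1*(D*S) + t.2.1*S + t.2.2)
      = PySem.List.pyRange 0 (Pn*(D*S)) 1 := by
  unfold pvTriples
  simp only [List.map_flatMap, List.map_map]
  have hinner : ∀ L d : Int,
      ((PySem.List.pyRange 0 S 1).map ((fun t : Int × Int × Int => t.1*(D*S) + t.2.1*S + t.2.2) ∘ (fun s => (L, d, s))))
        = PySem.List.pyRange (L*(D*S) + d*S) (L*(D*S) + d*S + S) 1 := by
    intro L d
    have h := pv_shiftR (L*(D*S) + d*S) 0 S
    simp only [add_zero] at h
    rw [h]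
    apply List.map_congr_left
    intro c hc
    show L*(D*S) + d*S + c = (L*(D*S) + d*S) + c
    ring
  have hmid : ∀ L : Int,
      (PySem.List.pyRange 0 D 1).flatMap (fun d =>
        PySem.List.pyRange (L*(D*S) + d*S) (L*(D*S) + d*S + S) 1)
        = PySem.List.pyRange (L*(D*S)) (L*(D*S) + D*S) 1 := by
    intro L
    have h := pv_concat (L*(D*S)) S hS D.toNat
    rw [Int.toNat_of_nonneg hD] at h
    exact h
  calc (PySem.List.pyRange 0 Pn 1).flatMap (fun L =>
        (PySem.List.pyRange 0 D 1).flatMap (fun d =>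
          (PySem.List.pyRange 0 S 1).map ((fun t : Int × Int × Int => t.1*(D*S) + t.2.1*S + t.2.2) ∘ (fun s => (L, d, s)))))
      = (PySem.List.pyRange 0 Pn 1).flatMap (fun L =>
          PySem.List.pyRange (L*(D*S)) (L*(D*S) + D*S) 1) := by
        apply List.flatMap_congr
        intro L hL
        rw [List.flatMap_congr (fun d hd => hinner L d)]
        exact hmid L
    _ = PySem.List.pyRange 0 (Pn*(D*S)) 1 := by
        have h := pv_concat 0 (D*S) (mul_nonneg hD hS) Pn.toNat
        rw [Int.toNat_of_nonneg hP] at h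
        simp only [zero_add] at h
        rw [← h]

lemma pv_ids_flat (D S DS N i l d s : Int) :
    pvIds D S DS N i l d s
      = (PySem.List.pyRange (i+1) (i + S - s) 1
          ++ (if s = S - 1 ∧ d < D - 1 then
                (i+1) :: PySem.List.pyRange ((d+1)*S) (l*DS) DS else []))
        ++ (PySem.List.pyRange (i+DS) N DS).flatMap (fun j =>
              (j :: (PySem.List.pyRange (j-s) (j-s+S) 1).filter (fun t => t != j))
                ++ (if s = S - 1 ∧ d < D - 1 then [j - s + S] else [])) := by
  unfold pvIds
  have hbody : (fun (ids : List Int) (j : Int) =>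
      let row := j - s
      let ids := ids ++ j :: (PySem.List.pyRange row (row+S) 1).filter (fun t => t != j)
      if s = S - 1 ∧ d < D - 1 then ids ++ [row + S] else ids)
      = fun ids j => ids ++ ((j :: (PySem.List.pyRange (j-s) (j-s+S) 1).filter (fun t => t != j))
            ++ (if s = S - 1 ∧ d < D - 1 then [j - s + S] else [])) := by
    funext ids j
    split <;> simp
  rw [hbody, PySem.List.foldl_append_eq_flatMap]
  split <;> simp

lemma pv_ids_map (days shifts P L d s : Int)
    (hL : 0 ≤ L ∧ L < P) (hd : 0 ≤ d ∧ d < days) (hs : 0 ≤ s ∧ s < shifts) :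
    (pvIds days shifts (days*shifts) (P*(days*shifts))
        (L*(days*shifts) + d*shifts + s) L d s).map (pvName (days*shifts) shifts)
      = pvNbrs days shifts P L d s := by
  have hS : 0 < shifts := by omega
  have hD : 0 < days := by omega
  have hDS : 0 < days*shifts := mul_pos hD hS
  set DS := days*shifts with hDSdef
  set i := L*DS + d*shifts + s with hidef
  rw [pv_ids_flat, pv_nbrs_eq]
  rw [List.map_append, List.map_append]
  congr 1
  · -- base part
    congr 1
    · -- later shifts, same layer/day
      have hsh : PySem.List.pyRange (i+1) (i + shifts - s) 1
          = (PySem.List.pyRange (s+1) shifts 1).map (fun t => (L*DS + d*shifts) + t) := by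
        have h := pv_shiftR (L*DS + d*shifts) (s+1) shifts
        rw [← h]
        congr 1 <;> omega
      rw [hsh, List.map_map]
      apply List.map_congr_left
      intro t ht
      have htb := PySem.List.mem_pyRange_one.mp ht
      show pvName DS shifts (L*DS + d*shifts + t) = pvNode L d t
      exact pv_name_encode days shifts L d t hd ⟨by omega, by omega⟩
    · -- rollover block
      by_cases hc : s = shifts - 1 ∧ d < days - 1
      · rw [if_pos hc, if_pos hc]
        rw [List.map_cons]
        have hd1 : (0:Int) ≤ d + 1 ∧ d + 1 < days := by omega
        congr 1
        · show pvName DS shifts (i+1) = pvNode L (d+1) 0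
          have : i + 1 = L*DS + (d+1)*shifts + 0 := by
            rw [hidef]; obtain ⟨rfl, -⟩ := hc; ring
          rw [this]
          exact pv_name_encode days shifts L (d+1) 0 hd1 ⟨le_refl 0, hS⟩
        · have hoff : (0:Int) ≤ (d+1)*shifts ∧ (d+1)*shifts < DS := by
            constructor
            · exact mul_nonneg (by omega) hS.le
            · rw [hDSdef]
              have : (d+2)*shifts ≤ days*shifts := mul_le_mul_of_nonneg_right (by omega) hS.le
              nlinarith
          have hst : PySem.List.pyRange ((d+1)*shifts) (L*DS) DS
              = (PySem.List.pyRange 0 L 1).map (fun l1 => l1*DS + (d+1)*shifts) := by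
            have h := pv_stride DS ((d+1)*shifts) 0 L hDS hoff.1 hoff.2
            rw [← h]
            congr 1
            ring
          rw [hst, List.map_map]
          apply List.map_congr_left
          intro l1 hl1
          show pvName DS shifts (l1*DS + (d+1)*shifts) = pvNode l1 (d+1) 0
          have : l1*DS + (d+1)*shifts = l1*DS + (d+1)*shifts + 0 := by ring
          rw [this]
          exact pv_name_encode days shifts l1 (d+1) 0 hd1 ⟨le_refl 0, hS⟩
      · rw [if_neg hc, if_neg hc]
        rfl
  · -- higher layers
    have hst : PySem.List.pyRange (i+DS) (P*DS) DS
        = (PySem.List.pyRange (L+1) P 1).map (fun l2 => l2*DS + (d*shifts + s)) := by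
      have hoff : (0:Int) ≤ d*shifts + s ∧ d*shifts + s < DS := by
        constructor
        · have := mul_nonneg hd.1 hS.le
          omega
        · rw [hDSdef]
          have : (d+1)*shifts ≤ days*shifts := mul_le_mul_of_nonneg_right (by omega) hS.le
          nlinarith
      have h := pv_stride DS (d*shifts + s) (L+1) P hDS hoff.1 hoff.2
      rw [← h]
      congr 1
      rw [hidef]; ring
    rw [hst, List.map_flatMap, List.flatMap_map]
    apply List.flatMap_congr
    intro l2 hl2
    have hl2b := PySem.List.mem_pyRange_one.mp hl2
    have hl20 : (0:Int) ≤ l2 := by omega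
    set j := l2*DS + (d*shifts + s) with hjdef
    have hrow : j - s = l2*DS + d*shifts := by rw [hjdef]; ring
    show ((j :: (PySem.List.pyRange (j-s) (j-s+shifts) 1).filter (fun t => t != j))
        ++ (if s = shifts - 1 ∧ d < days - 1 then [j - s + shifts] else [])).map (pvName DS shifts)
      = pvChunkB days shifts d s l2
    rw [List.map_append, List.map_cons]
    have hnj : pvName DS shifts j = pvNode l2 d s := by
      have : j = l2*DS + d*shifts + s := by rw [hjdef]; ring
      rw [this]
      exact pv_name_encode days shifts l2 d s hd hs
    have hfl : PySem.List.pyRange (j-s) (j-s+shifts) 1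
        = (PySem.List.pyRange 0 shifts 1).map (fun t => (j-s) + t) := by
      have h := pv_shiftR (j-s) 0 shifts
      simp only [add_zero] at h
      exact h
    have hfilter : (PySem.List.pyRange (j-s) (j-s+shifts) 1).filter (fun t => t != j)
        = ((PySem.List.pyRange 0 shifts 1).filter (fun t => t != s)).map (fun t => (j-s) + t) := by
      rw [hfl, List.filter_map]
      congr 1
      apply List.filter_congr
      intro t ht
      show ((j-s) + t != j) = (t != s)
      by_cases hts : t = s
      · have hjs : (j-s) + t = j := by omega
        rw [bne_eq_false_iff_eq.mpr hjs, bne_eq_false_iff_eq.mpr hts]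
      · have hne : (j-s) + t ≠ j := by omega
        rw [bne_iff_ne.mpr hne, bne_iff_ne.mpr hts]
    rw [hfilter]
    have hmid : (((PySem.List.pyRange 0 shifts 1).filter (fun t => t != s)).map
          (fun t => (j-s) + t)).map (pvName DS shifts)
        = ((PySem.List.pyRange 0 shifts 1).filter (fun t => t != s)).map (fun t => pvNode l2 d t) := by
      rw [List.map_map]
      apply List.map_congr_left
      intro t ht
      have htb := pv_mem_range0 (List.mem_of_mem_filter ht)
      show pvName DS shifts ((j-s) + t) = pvNode l2 d t
      have hje : (j-s) + t = l2*DS + d*shifts + t := by rw [hrow]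
      rw [hje]
      exact pv_name_encode days shifts l2 d t hd ⟨htb.1, htb.2⟩
    have htail : (if s = shifts - 1 ∧ d < days - 1 then [j - s + shifts] else ([] : List Int)).map
          (pvName DS shifts)
        = (if s = shifts - 1 ∧ d < days - 1 then [pvNode l2 (d+1) 0] else []) := by
      by_cases hc : s = shifts - 1 ∧ d < days - 1
      · rw [if_pos hc, if_pos hc, List.map_cons, List.map_nil]
        have hje : j - s + shifts = l2*DS + (d+1)*shifts + 0 := by rw [hrow]; ring
        rw [hje, pv_name_encode days shifts l2 (d+1) 0 ⟨by omega, by omega⟩ ⟨le_refl 0, hS⟩]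
      · rw [if_neg hc, if_neg hc]
        rfl
    rw [hmid, htail, hnj]
    unfold pvChunkB
    rw [List.cons_append]

lemma pv_B_shape (nurses days shifts P : Int) :
    nsp_to_graph_coloring_alt nurses days shifts P
      = ((pvTriples days shifts P).foldl (fun acc t =>
          acc.insert (pvNodeT t) (PySem.Set.ofList (pvNbrs days shifts P t.1 t.2.1 t.2.2)))
          PySem.Dict.empty).items := by
  unfold nsp_to_graph_coloring_alt
  by_cases hpos : 0 < days ∧ 0 < shifts ∧ 0 < P
  · obtain ⟨hD, hS, hP⟩ := hpos
    rw [max_eq_left hD.le, max_eq_left hS.le, max_eq_left hP.le]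
    show ((PySem.List.pyRange 0 (P*(days*shifts)) 1).foldl (fun acc i =>
        acc.insert (pvName (days*shifts) shifts i)
          (PySem.Set.ofList ((pvIds days shifts (days*shifts) (P*(days*shifts)) i
              (PySem.Int.floordiv i (days*shifts))
              (PySem.Int.floordiv (PySem.Int.mod i (days*shifts)) shifts)
              (PySem.Int.mod (PySem.Int.mod i (days*shifts)) shifts)).map
            (pvName (days*shifts) shifts)))) PySem.Dict.empty).items = _
    rw [← pv_encode_range days shifts P hD.le hS.le hP.le, List.foldl_map]
    congr 1
    apply PySem.List.foldl_congr_mem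
    rintro acc ⟨L, d, s⟩ ht
    obtain ⟨hLb, hdb, hsb⟩ := pv_mem_triples.mp ht
    have hSpos : 0 < shifts := by omega
    have hDS : 0 < days*shifts := mul_pos (by omega) hSpos
    have hoff : (0:Int) ≤ d*shifts + s ∧ d*shifts + s < days*shifts := by
      constructor
      · have := mul_nonneg hdb.1 hSpos.le
        omega
      · have : (d+1)*shifts ≤ days*shifts := mul_le_mul_of_nonneg_right (by omega) hSpos.le
        nlinarith
    have hre : L*(days*shifts) + d*shifts + s = L*(days*shifts) + (d*shifts + s) := by ring
    obtain ⟨hf1, hm1⟩ := pv_decode L (d*shifts + s) (days*shifts) hDS hoff.1 hoff.2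
    obtain ⟨hf2, hm2⟩ := pv_decode d s shifts hSpos hsb.1 hsb.2
    show acc.insert (pvName (days*shifts) shifts (L*(days*shifts) + d*shifts + s))
          (PySem.Set.ofList ((pvIds days shifts (days*shifts) (P*(days*shifts))
              (L*(days*shifts) + d*shifts + s)
              (PySem.Int.floordiv (L*(days*shifts) + d*shifts + s) (days*shifts))
              (PySem.Int.floordiv (PySem.Int.mod (L*(days*shifts) + d*shifts + s) (days*shifts)) shifts)
              (PySem.Int.mod (PySem.Int.mod (L*(days*shifts) + d*shifts + s) (days*shifts)) shifts)).map
            (pvName (days*shifts) shifts)))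
      = acc.insert (pvNodeT (L, d, s)) (PySem.Set.ofList (pvNbrs days shifts P L d s))
    rw [hre, hf1, hm1, hf2, hm2, ← hre]
    rw [pv_ids_map days shifts P L d s hLb hdb hsb]
    have hname : pvName (days*shifts) shifts (L*(days*shifts) + d*shifts + s) = pvNodeT (L, d, s) :=
      pv_name_encode days shifts L d s hdb hsb
    rw [hname]
  · have hz : (max P 0) * ((max days 0) * (max shifts 0)) = 0 := by
      rcases not_and_or.mp hpos with h | h
      · have : max days 0 = 0 := by omega
        rw [this]; ring
      · rcases not_and_or.mp h with h2 | h2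
        · have : max shifts 0 = 0 := by omega
          rw [this]; ring
        · have : max P 0 = 0 := by omega
          rw [this]; ring
    have htz : pvTriples days shifts P = [] := by
      unfold pvTriples
      apply List.flatMap_eq_nil_iff.mpr
      intro L hL
      apply List.flatMap_eq_nil_iff.mpr
      intro d hd
      have hLb := pv_mem_range0 hL
      have hdb := pv_mem_range0 hd
      have hsz : shifts ≤ 0 := by
        rcases not_and_or.mp hpos with h | h
        · omega
        · rcases not_and_or.mp h with h2 | h2
          · omega
          · omega
      rw [PySem.List.pyRange_one_eq_nil hsz]
      rfl
    show ((PySem.List.pyRange 0 ((max P 0)*((max days 0)*(max shifts 0))) 1).foldl (fun acc i =>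
        acc.insert (pvName ((max days 0)*(max shifts 0)) (max shifts 0) i)
          (PySem.Set.ofList ((pvIds (max days 0) (max shifts 0) ((max days 0)*(max shifts 0))
              ((max P 0)*((max days 0)*(max shifts 0))) i
              (PySem.Int.floordiv i ((max days 0)*(max shifts 0)))
              (PySem.Int.floordiv (PySem.Int.mod i ((max days 0)*(max shifts 0))) (max shifts 0))
              (PySem.Int.mod (PySem.Int.mod i ((max days 0)*(max shifts 0))) (max shifts 0))).map
            (pvName ((max days 0)*(max shifts 0)) (max shifts 0))))) PySem.Dict.empty).items = _
    rw [hz, htz]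
    rw [PySem.List.pyRange_one_eq_nil (le_refl 0)]
    rfl

theorem pv_main (nurses days shifts P : Int) :
    nsp_to_graph_coloring nurses days shifts P = nsp_to_graph_coloring_alt nurses days shifts P := by
  rw [pv_A_shape, pv_B_shape]
  have hB := PySem.Dict.items_foldl_insert_fresh (pvTriples days shifts P) pvNodeT
    (fun t => PySem.Set.ofList (pvNbrs days shifts P t.1 t.2.1 t.2.2)) PySem.Dict.empty
    (fun a _ => PySem.Dict.contains_empty _) (pv_keys_nodup days shifts P)
  simp only [] at hB
  rw [hB]
  rw [PySem.Dict.items_eq_map_keys _ (pv_final_nodup days shifts P) PySem.Set.empty,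
      pv_final_keys, List.map_map]
  have hempty : (PySem.Dict.empty : PySem.Dict String (PySem.Set String)).items = [] := rfl
  rw [hempty, List.nil_append]
  apply List.map_congr_left
  rintro ⟨L, d, s⟩ ht
  obtain ⟨hLb, hdb, hsb⟩ := pv_mem_triples.mp ht
  have hg := pv_getD_final days shifts P L d s hLb hdb hsb
  simp only [Function.comp_def, pvNodeT]
  rw [hg]

-- ===== VERDICT (by name: the statement is the Claim_ definition above) =====
theorem nsp_to_graph_coloring_spec : Claim_equal_nsp_to_graph_coloring := by
  intro nurses days shifts nurses_per_shift _
  unfold Spec_nsp_to_graph_coloring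
  exact pv_main nurses days shifts nurses_per_shift
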